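-- pv_equiv track=rewrite | github.com/ljc0311/a4 | scripts/download_matching_chromedriver.py | find_matching_chromedriver
-- ===== SOURCE A (Python) =====
-- def find_matching_chromedriver(chrome_version, available_versions):
--     """查找匹配的ChromeDriver版本"""
--     chrome_major = chrome_version.split('.')[0]
--
--     # 查找完全匹配的版本
--     for version_info in reversed(available_versions):
--         version = version_info.get('version', '')
--         if version == chrome_version:
--             return version_info
--
--     # 查找主版本号匹配的最新版本
--     for version_info in reversed(available_versions):
--         version = version_info.get('version', '')
--         if version.startswith(chrome_major + '.'):
--             return version_info
--
--     return None
-- ===== SOURCE B (Python) =====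
-- def find_matching_chromedriver(chrome_version, available_versions):
--     """One reversed pass: return an exact match immediately; remember the
--     first major-version match as a fallback candidate."""
--     chrome_prefix = chrome_version.split('.')[0] + '.'
--     candidate = None
--     for version_info in reversed(available_versions):
--         version = version_info.get('version', '')
--         if version == chrome_version:
--             return version_info
--         if candidate is None and version.startswith(chrome_prefix):
--             candidate = version_info
--     return candidate
-- ===== Notes on version B (the rewrite author's own statement) =====
-- stated objective: simpler
-- what changed: Fuses A's two separate reversed scans into one reversed pass that returns an exact match immediately and keeps the first major-version match as a fallback candidate.
import Mathlib
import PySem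

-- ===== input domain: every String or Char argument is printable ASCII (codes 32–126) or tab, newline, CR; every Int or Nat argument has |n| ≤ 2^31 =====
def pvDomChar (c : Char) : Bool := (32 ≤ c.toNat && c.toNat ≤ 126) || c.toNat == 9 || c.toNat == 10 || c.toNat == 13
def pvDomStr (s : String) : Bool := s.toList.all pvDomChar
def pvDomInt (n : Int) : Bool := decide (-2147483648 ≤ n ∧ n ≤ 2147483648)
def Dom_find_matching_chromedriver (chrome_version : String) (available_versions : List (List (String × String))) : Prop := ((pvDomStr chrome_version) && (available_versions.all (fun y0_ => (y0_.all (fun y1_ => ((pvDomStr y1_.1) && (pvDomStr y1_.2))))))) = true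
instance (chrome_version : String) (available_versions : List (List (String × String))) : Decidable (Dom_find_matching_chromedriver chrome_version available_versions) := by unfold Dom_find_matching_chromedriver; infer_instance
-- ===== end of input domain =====

-- B fuses A's two reversed scans into one reversed pass with a fallback candidate (objective: simpler).

-- version_info.get('version', ''): first match in the association list
def pvGetVersion (d : List (String × String)) : String :=
  match d.find? (fun p => p.1 == "version") with
  | some p => p.2
  | none => ""

-- ===== PORT A =====
def find_matching_chromedriver (chrome_version : String) (available_versions : List (List (String × String))) : Option (List (String × String)) :=
  let chrome_major := (((PySem.Str.split? chrome_version ".").getD []).headD "")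
  -- first loop: exact match over reversed(available_versions)
  match available_versions.reverse.find? (fun vi => pvGetVersion vi == chrome_version) with
  | some vi => some vi
  | none =>
    -- second loop: major-version match over reversed(available_versions)
    available_versions.reverse.find? (fun vi => PySem.Str.startswith (pvGetVersion vi) (chrome_major ++ "."))

-- ===== PORT B =====
-- single loop over the reversed list, carrying the fallback candidate
def pvScan (chrome_version chrome_prefix : String) : List (List (String × String)) → Option (List (String × String)) → Option (List (String × String))
  | [], candidate => candidate
  | vi :: rest, candidate =>
    let v := pvGetVersion vi
    if v == chrome_version then some vi
    else pvScan chrome_version chrome_prefix rest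
      (if candidate.isNone && PySem.Str.startswith v chrome_prefix then some vi else candidate)

def find_matching_chromedriver_alt (chrome_version : String) (available_versions : List (List (String × String))) : Option (List (String × String)) :=
  let chrome_prefix := (((PySem.Str.split? chrome_version ".").getD []).headD "") ++ "."
  pvScan chrome_version chrome_prefix available_versions.reverse none

-- ===== PRECONDITION & SPEC =====
def Spec_find_matching_chromedriver (chrome_version : String) (available_versions : List (List (String × String))) (out : Option (List (String × String))) : Prop := out = find_matching_chromedriver_alt chrome_version available_versions
instance (chrome_version : String) (available_versions : List (List (String × String))) (out : Option (List (String × String))) : Decidable (Spec_find_matching_chromedriver chrome_version available_versions out) := by unfold Spec_find_matching_chromedriver; infer_instance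

-- ===== CLAIM (what is proved, stated in full; the proofs are below) =====
def Claim_equal_find_matching_chromedriver : Prop := ∀ (chrome_version : String) (available_versions : List (List (String × String))), Dom_find_matching_chromedriver chrome_version available_versions → Spec_find_matching_chromedriver chrome_version available_versions (find_matching_chromedriver chrome_version available_versions)

-- ===== LEMMAS AND PROOFS =====

-- the fused scan equals "first exact match, else candidate, else first major match"
theorem pvScan_eq (cv pfx : String) (l : List (List (String × String))) :
    ∀ candidate, pvScan cv pfx l candidate =
      match l.find? (fun vi => pvGetVersion vi == cv) with
      | some vi => some vi
      | none => candidate.orElse (fun _ => l.find? (fun vi => PySem.Str.startswith (pvGetVersion vi) pfx)) := by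
  induction l with
  | nil => intro candidate; cases candidate <;> simp [pvScan]
  | cons vi rest ih =>
    intro candidate
    simp only [pvScan]
    by_cases h : pvGetVersion vi == cv
    · simp [h]
    · rw [if_neg (by simpa using h), ih]
      simp only [List.find?_cons]
      rw [show (pvGetVersion vi == cv) = false from by simpa using h]
      by_cases hs : PySem.Str.startswith (pvGetVersion vi) pfx
      all_goals cases hf : rest.find? (fun vi => pvGetVersion vi == cv) <;>
        cases candidate <;> simp_all

-- ===== VERDICT (by name: the statement is the Claim_ definition above) =====
theorem find_matching_chromedriver_spec : Claim_equal_find_matching_chromedriver := by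
  intro cv avs _
  unfold Spec_find_matching_chromedriver find_matching_chromedriver find_matching_chromedriver_alt
  rw [pvScan_eq]
  cases avs.reverse.find? (fun vi => pvGetVersion vi == cv) <;> simp
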